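-- pv_equiv track=rewrite | github.com/oivas000/AMR | grader/grading_engine.py | _find_student_answer
-- ===== SOURCE A (Python) =====
-- from typing import Dict, Optional, Tuple
--
-- def _find_student_answer(q_id: str, student_answers: Dict[str, str]) -> Optional[str]:
--     """Try to match question ID with some flexibility"""
--     # Exact match
--     if q_id in student_answers:
--         return student_answers[q_id]
--
--     # Normalize both sides
--     q_norm = q_id.lower().strip()
--     for k, v in student_answers.items():
--         if k.lower().strip() == q_norm:
--             return v
--
--     # Try numeric equivalence (e.g., "01" == "1")
--     try:
--         q_int = str(int(q_id))
--         for k, v in student_answers.items():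
--             try:
--                 if str(int(k)) == q_int:
--                     return v
--             except:
--                 pass
--     except:
--         pass
--
--     return None
-- ===== SOURCE B (Python) =====
-- def _find_student_answer(q_id: str, student_answers):
--     """Single pass over the items, keeping the first-found candidate for each
--     of the three match kinds; priority resolved once at the end."""
--     q_norm = q_id.lower().strip()
--     try:
--         q_int = str(int(q_id))
--     except Exception:
--         q_int = None
--     exact = normed = numeric = None
--     for k, v in student_answers.items():
--         if exact is None and k == q_id:
--             exact = v
--         if normed is None and k.lower().strip() == q_norm:
--             normed = v
--         if numeric is None and q_int is not None:
--             try: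
--                 if str(int(k)) == q_int:
--                     numeric = v
--             except Exception:
--                 pass
--     if exact is not None:
--         return exact
--     if normed is not None:
--         return normed
--     return numeric
-- ===== Notes on version B (the rewrite author's own statement) =====
-- stated objective: alternative
-- what changed: Replaces A's three sequential scans (exact lookup, normalized scan, numeric scan) with one single pass that records the first-found candidate of each match kind and resolves the exact>normalized>numeric priority after the loop.
import Mathlib
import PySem

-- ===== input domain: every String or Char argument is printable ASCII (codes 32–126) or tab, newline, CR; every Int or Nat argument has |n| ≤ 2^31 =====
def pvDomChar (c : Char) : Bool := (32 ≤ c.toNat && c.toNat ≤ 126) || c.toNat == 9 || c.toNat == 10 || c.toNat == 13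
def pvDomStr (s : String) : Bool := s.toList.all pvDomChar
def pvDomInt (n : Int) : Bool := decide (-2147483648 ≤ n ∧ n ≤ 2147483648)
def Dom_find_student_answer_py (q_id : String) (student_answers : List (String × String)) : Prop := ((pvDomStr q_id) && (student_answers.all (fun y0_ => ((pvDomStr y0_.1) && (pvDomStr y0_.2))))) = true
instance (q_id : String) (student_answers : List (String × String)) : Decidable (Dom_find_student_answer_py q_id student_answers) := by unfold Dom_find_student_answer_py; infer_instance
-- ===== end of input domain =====

-- B does the same task in ONE pass over the items (three first-found candidates, priority
-- resolved after the loop) instead of A's three sequential scans; same O(n) cost.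

-- ===== PORT A =====
-- `if q_id in student_answers: return student_answers[q_id]` — first-match lookup on the assoc list
def pyA_exact (q_id : String) : List (String × String) → Option String
  | [] => none
  | (k, v) :: rest => if k == q_id then some v else pyA_exact q_id rest

-- `for k, v in …: if k.lower().strip() == q_norm: return v`
def pyA_norm (q_norm : String) : List (String × String) → Option String
  | [] => none
  | (k, v) :: rest =>
      if PySem.Str.strip (PySem.Str.lower k) == q_norm then some v else pyA_norm q_norm rest

-- `for k, v in …: try: if str(int(k)) == q_int: return v; except: pass`
def pyA_num (q_int : String) : List (String × String) → Option String
  | [] => none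
  | (k, v) :: rest =>
      match PySem.Int.ofStr? k with
      | some m => if PySem.Int.toStr m == q_int then some v else pyA_num q_int rest
      | none => pyA_num q_int rest

def find_student_answer_py (q_id : String) (student_answers : List (String × String)) : Option String :=
  match pyA_exact q_id student_answers with
  | some v => some v
  | none =>
    -- q_norm = q_id.lower().strip(), inlined
    match pyA_norm (PySem.Str.strip (PySem.Str.lower q_id)) student_answers with
    | some v => some v
    | none =>
      match PySem.Int.ofStr? q_id with
      | some n => pyA_num (PySem.Int.toStr n) student_answers
      | none => none

-- ===== PORT B =====
-- one fold carrying the three first-found candidates (exact, normalized, numeric)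
def pyB_step (q_id q_norm : String) (q_int : Option String)
    (st : Option String × Option String × Option String) (kv : String × String) :
    Option String × Option String × Option String :=
  let e := if st.1.isNone && (kv.1 == q_id) then some kv.2 else st.1
  let n := if st.2.1.isNone && (PySem.Str.strip (PySem.Str.lower kv.1) == q_norm) then some kv.2 else st.2.1
  let m := if st.2.2.isNone && q_int.isSome &&
      ((PySem.Int.ofStr? kv.1).map PySem.Int.toStr == q_int) then some kv.2 else st.2.2
  (e, n, m)

def find_student_answer_py_alt (q_id : String) (student_answers : List (String × String)) : Option String :=
  match student_answers.foldl
      (pyB_step q_id (PySem.Str.strip (PySem.Str.lower q_id))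
        ((PySem.Int.ofStr? q_id).map PySem.Int.toStr)) (none, none, none) with
  | (some v, _, _) => some v
  | (none, some v, _) => some v
  | (none, none, m) => m

-- ===== PRECONDITION & SPEC =====
def Spec_find_student_answer_py (q_id : String) (student_answers : List (String × String)) (out : Option String) : Prop := out = find_student_answer_py_alt q_id student_answers
instance (q_id : String) (student_answers : List (String × String)) (out : Option String) : Decidable (Spec_find_student_answer_py q_id student_answers out) := by unfold Spec_find_student_answer_py; infer_instance

-- ===== CLAIM (what is proved, stated in full; the proofs are below) =====
def Claim_equal_find_student_answer_py : Prop := ∀ (q_id : String) (student_answers : List (String × String)), Dom_find_student_answer_py q_id student_answers → Spec_find_student_answer_py q_id student_answers (find_student_answer_py q_id student_answers)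

-- ===== LEMMAS AND PROOFS =====

-- the numeric candidate tracked by B's fold, as a first-match recursion, per case of q_int
theorem pyB_fold_inv (q_id q_norm : String) (q_int : Option String)
    (l : List (String × String)) (e n m : Option String) :
    l.foldl (pyB_step q_id q_norm q_int) (e, n, m) =
      (e.orElse (fun _ => pyA_exact q_id l),
       n.orElse (fun _ => pyA_norm q_norm l),
       m.orElse (fun _ => match q_int with
                          | some qi => pyA_num qi l
                          | none => none)) := by
  induction l generalizing e n m with
  | nil => cases q_int <;> cases e <;> cases n <;> cases m <;> simp [pyA_exact, pyA_norm, pyA_num, Option.orElse]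
  | cons kv rest ih =>
    obtain ⟨k, v⟩ := kv
    simp only [List.foldl_cons, pyB_step]
    rw [ih]
    cases e <;> cases n <;> cases m <;> cases q_int <;>
      simp [pyA_exact, pyA_norm, pyA_num, Option.orElse] <;>
      split_ifs <;>
      simp_all <;>
      (try cases h : PySem.Int.ofStr? k) <;> simp_all

-- ===== VERDICT (by name: the statement is the Claim_ definition above) =====
theorem find_student_answer_py_spec : Claim_equal_find_student_answer_py := by
  intro q_id sa _
  unfold Spec_find_student_answer_py find_student_answer_py find_student_answer_py_alt
  rw [pyB_fold_inv]
  simp only [Option.orElse]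
  cases he : pyA_exact q_id sa <;>
  cases hn : pyA_norm (PySem.Str.strip (PySem.Str.lower q_id)) sa <;>
  cases hq : PySem.Int.ofStr? q_id <;> simp
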